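-- pv_equiv track=rewrite | github.com/sarvex/python-leetcode | 2200.Find All K-Distant Indices in an Array.py | findKDistantIndices
-- ===== SOURCE A (Python) =====
-- from typing import List
--
-- def findKDistantIndices(
--     nums: List[int], key: int, k: int
-- ) -> List[int]:
--     """Single-pass approach for finding K-distant indices.
--
--     Intuition: Process the array once, keeping track of the minimum index to consider
--     to avoid duplicates when ranges overlap.
--
--     Approach:
--     1. Maintain a result list and a pointer to the next index to consider
--     2. When we find nums[j] == key, add all valid indices from max(next_index, j-k) to j+k
--     3. Update the next index to j+k+1 to avoid duplicates in overlapping ranges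
--
--     Complexity:
--     Time: O(n), where n is the length of nums (single pass)
--     Space: O(n), for storing the result
--     """
--     result = []
--     next_index = 0  # Next index to consider (avoids duplicates)
--     n = len(nums)
--
--     for j in range(n):
--         if nums[j] == key:
--             left = max(next_index, j - k)
--             right = min(n - 1, j + k) + 1
--
--             result.extend(range(left, right))
--
--             next_index = right
--
--     return result
-- ===== SOURCE B (Python) =====
-- from typing import List
--
--
-- def findKDistantIndices(
--     nums: List[int], key: int, k: int
-- ) -> List[int]:
--     """Build-table-then-filter: collect key positions, then keep every index
--     with some key position within distance k."""
--     keys = [j for j, x in enumerate(nums) if x == key]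
--     return [i for i in range(len(nums)) if any(abs(i - j) <= k for j in keys)]
-- ===== Notes on version B (the rewrite author's own statement) =====
-- stated objective: simpler
-- what changed: Replaces A's fused single sweep with next_index dedup bookkeeping by a two-phase decomposition: collect the key positions once, then filter range(n) by 'some key position within distance k'.
import Mathlib
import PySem

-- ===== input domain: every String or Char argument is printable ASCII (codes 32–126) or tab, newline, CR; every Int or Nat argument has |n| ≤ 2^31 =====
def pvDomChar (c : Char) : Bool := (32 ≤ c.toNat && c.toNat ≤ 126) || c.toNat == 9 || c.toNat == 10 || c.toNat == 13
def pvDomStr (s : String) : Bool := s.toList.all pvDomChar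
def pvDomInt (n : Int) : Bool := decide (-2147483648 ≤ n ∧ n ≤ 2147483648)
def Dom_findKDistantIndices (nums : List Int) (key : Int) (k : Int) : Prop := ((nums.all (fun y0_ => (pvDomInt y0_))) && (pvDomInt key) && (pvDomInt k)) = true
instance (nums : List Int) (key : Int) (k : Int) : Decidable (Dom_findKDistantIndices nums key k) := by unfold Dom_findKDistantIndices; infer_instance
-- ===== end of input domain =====

-- B replaces A's fused sweep-with-next_index dedup bookkeeping by a simpler two-phase decomposition: collect the key positions, then filter range(n) by proximity.

-- ===== PORT A =====
def stepA (nums : List Int) (key k n : Int) (st : List Int × Int) (j : Int) : List Int × Int :=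
  if PySem.List.pyGetD nums j 0 = key then
    (st.1 ++ PySem.List.pyRange (max st.2 (j - k)) (min (n - 1) (j + k) + 1) 1,
     min (n - 1) (j + k) + 1)
  else st

def findKDistantIndices (nums : List Int) (key : Int) (k : Int) : List Int :=
  ((PySem.List.pyRange 0 (nums.length : Int) 1).foldl
    (stepA nums key k (nums.length : Int)) ([], 0)).1

-- ===== PORT B =====
def findKDistantIndices_alt (nums : List Int) (key : Int) (k : Int) : List Int :=
  let keys : List Int :=
    (PySem.List.enumerate nums).filterMap (fun p => if p.2 = key then some p.1 else none)
  (PySem.List.pyRange 0 (nums.length : Int) 1).filter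
    (fun i => keys.any (fun j => decide (|i - j| ≤ k)))

-- ===== PRECONDITION & SPEC =====
def Spec_findKDistantIndices (nums : List Int) (key : Int) (k : Int) (out : List Int) : Prop := out = findKDistantIndices_alt nums key k
instance (nums : List Int) (key : Int) (k : Int) (out : List Int) : Decidable (Spec_findKDistantIndices nums key k out) := by unfold Spec_findKDistantIndices; infer_instance

-- ===== CLAIM (what is proved, stated in full; the proofs are below) =====
def Claim_equal_findKDistantIndices : Prop := ∀ (nums : List Int) (key : Int) (k : Int), Dom_findKDistantIndices nums key k → Spec_findKDistantIndices nums key k (findKDistantIndices nums key k)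

-- ===== LEMMAS AND PROOFS =====

-- "some key occurrence at position < m lies within distance k of i"
def nearB (nums : List Int) (key k m i : Int) : Bool :=
  (PySem.List.enumerate nums).any
    (fun p => decide (p.1 < m) && (decide (p.2 = key) && decide (|i - p.1| ≤ k)))

def loopA (nums : List Int) (key k : Int) (t : Nat) : List Int × Int :=
  (PySem.List.pyRange 0 (t : Int) 1).foldl (stepA nums key k (nums.length : Int)) ([], 0)

lemma any_enumerate_iff (nums : List Int) (f : Int × Int → Bool) (s : Int) :
    (PySem.List.enumerate nums s).any f = true ↔
      ∃ jn : Nat, ∃ h : jn < nums.length, f (s + jn, nums[jn]) = true := by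
  induction nums generalizing s with
  | nil => simp [PySem.List.enumerate_nil]
  | cons x xs ih =>
    rw [PySem.List.enumerate_cons, List.any_cons]
    constructor
    · intro h
      rcases Bool.or_eq_true_iff.mp h with h | h
      · exact ⟨0, by simp, by simpa using h⟩
      · rcases (ih (s + 1)).mp h with ⟨jn, hj, hf⟩
        refine ⟨jn + 1, by simp only [List.length_cons]; omega, ?_⟩
        have : s + ((jn : Int) + 1) = s + 1 + (jn : Int) := by ring
        simpa [this] using hf
    · rintro ⟨jn, hj, hf⟩
      cases jn with
      | zero => exact Bool.or_eq_true_iff.mpr (Or.inl (by simpa using hf))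
      | succ m =>
        refine Bool.or_eq_true_iff.mpr (Or.inr ((ih (s + 1)).mpr ⟨m, by simp only [List.length_cons] at hj; omega, ?_⟩))
        have : s + 1 + (m : Int) = s + ((m : Int) + 1) := by ring
        simpa [this] using hf

lemma nearB_iff (nums : List Int) (key k m i : Int) :
    nearB nums key k m i = true ↔
      ∃ jn : Nat, ∃ h : jn < nums.length,
        (jn : Int) < m ∧ nums[jn] = key ∧ |i - (jn : Int)| ≤ k := by
  unfold nearB
  rw [any_enumerate_iff]
  simp

lemma any_filterMap {α β : Type} (l : List α) (g : α → Option β) (f : β → Bool) :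
    (l.filterMap g).any f = l.any (fun a => ((g a).map f).getD false) := by
  induction l with
  | nil => simp
  | cons x xs ih =>
    rw [List.filterMap_cons]
    cases h : g x <;> simp [h, ih]

lemma altPred_iff (nums : List Int) (key k i : Int) :
    (((PySem.List.enumerate nums).filterMap
        (fun p => if p.2 = key then some p.1 else none)).any
      (fun j => decide (|i - j| ≤ k)) = true) ↔
      ∃ jn : Nat, ∃ h : jn < nums.length, nums[jn] = key ∧ |i - (jn : Int)| ≤ k := by
  rw [any_filterMap, any_enumerate_iff]
  constructor
  · rintro ⟨jn, hj, hf⟩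
    refine ⟨jn, hj, ?_⟩
    by_cases hkey : nums[jn] = key <;> simp [hkey] at hf ⊢
    exact hf
  · rintro ⟨jn, hj, hkey, hd⟩
    exact ⟨jn, hj, by simp [hkey, hd]⟩

lemma loopA_succ (nums : List Int) (key k : Int) (t : Nat) :
    loopA nums key k (t + 1) =
      stepA nums key k (nums.length : Int) (loopA nums key k t) (t : Int) := by
  unfold loopA
  rw [show (((t + 1 : Nat) : Int)) = (t : Int) + 1 by push_cast; ring,
    PySem.List.pyRange_one_succ_right (by positivity), List.foldl_append]
  simp

lemma nearB_succ (nums : List Int) (key k i : Int) (t : Nat) (ht : t < nums.length) :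
    nearB nums key k ((t : Int) + 1) i =
      (nearB nums key k (t : Int) i ||
        (decide (nums[t] = key) && decide (|i - (t : Int)| ≤ k))) := by
  rw [Bool.eq_iff_iff, nearB_iff, Bool.or_eq_true_iff, nearB_iff, Bool.and_eq_true,
    decide_eq_true_iff, decide_eq_true_iff]
  constructor
  · rintro ⟨jn, hj, hlt, hkey, hd⟩
    by_cases hjt : jn = t
    · subst hjt; exact Or.inr ⟨hkey, hd⟩
    · exact Or.inl ⟨jn, hj, by omega, hkey, hd⟩
  · rintro (⟨jn, hj, hlt, hkey, hd⟩ | ⟨hkey, hd⟩)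
    · exact ⟨jn, hj, by omega, hkey, hd⟩
    · exact ⟨t, ht, by omega, hkey, hd⟩

lemma filter_split (n left right : Int) (p q : Int → Bool)
    (hl : 0 ≤ left) (hlr : left ≤ right) (hr : right ≤ n)
    (hq : ∀ i, 0 ≤ i → i < n →
      q i = (p i || (decide (left ≤ i) && decide (i < right))))
    (hp : ∀ i, 0 ≤ i → i < n → p i = true → i < left) :
    (PySem.List.pyRange 0 n 1).filter q
      = (PySem.List.pyRange 0 n 1).filter p ++ PySem.List.pyRange left right 1 := by
  rw [PySem.List.pyRange_one_append 0 left n hl (le_trans hlr hr),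
      PySem.List.pyRange_one_append left right n hlr hr]
  simp only [List.filter_append]
  have h1 : ∀ i ∈ PySem.List.pyRange 0 left 1, q i = p i := by
    intro i hi
    rw [PySem.List.mem_pyRange_one] at hi
    rw [hq i hi.1 (by omega)]
    have : ¬ (left ≤ i) := by omega
    simp [this]
  have h2 : (PySem.List.pyRange left right 1).filter q = PySem.List.pyRange left right 1 := by
    apply List.filter_eq_self.mpr
    intro i hi
    rw [PySem.List.mem_pyRange_one] at hi
    rw [hq i (by omega) (by omega)]
    simp [hi.1, hi.2]
  have h3 : (PySem.List.pyRange left right 1).filter p = [] := by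
    apply List.filter_eq_nil_iff.mpr
    intro i hi
    rw [PySem.List.mem_pyRange_one] at hi
    intro hpi
    have := hp i (by omega) (by omega) hpi
    omega
  have h4 : (PySem.List.pyRange right n 1).filter q = [] := by
    apply List.filter_eq_nil_iff.mpr
    intro i hi
    rw [PySem.List.mem_pyRange_one] at hi
    intro hqi
    rw [hq i (by omega) hi.2] at hqi
    rcases Bool.or_eq_true_iff.mp hqi with h | h
    · have := hp i (by omega) hi.2 h; omega
    · simp at h; omega
  have h5 : (PySem.List.pyRange right n 1).filter p = [] := by
    apply List.filter_eq_nil_iff.mpr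
    intro i hi
    rw [PySem.List.mem_pyRange_one] at hi
    intro hpi
    have := hp i (by omega) hi.2 hpi
    omega
  rw [List.filter_congr h1, h2, h3, h4, h5]
  simp

lemma invA (nums : List Int) (key k : Int) (hk : 0 ≤ k) (t : Nat) (ht : t ≤ nums.length) :
    ((loopA nums key k t).1
        = (PySem.List.pyRange 0 (nums.length : Int) 1).filter
            (fun i => nearB nums key k (t : Int) i))
    ∧ (∀ i : Int, 0 ≤ i → i < (nums.length : Int) →
        nearB nums key k (t : Int) i = true → i < (loopA nums key k t).2)
    ∧ (∀ i : Int, 0 ≤ i → i < (nums.length : Int) → (t : Int) - 1 - k ≤ i →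
        i < (loopA nums key k t).2 → nearB nums key k (t : Int) i = true)
    ∧ ((loopA nums key k t).2 = 0 ∨
        ∃ jp : Nat, ∃ hp : jp < nums.length, (jp : Int) < (t : Int) ∧ nums[jp] = key ∧
          (loopA nums key k t).2 = min ((nums.length : Int) - 1) ((jp : Int) + k) + 1) := by
  induction t with
  | zero =>
    have hz : loopA nums key k 0 = ([], 0) := by
      simp [loopA, PySem.List.pyRange_one_eq_nil]
    rw [hz]
    refine ⟨?_, ?_, ?_, Or.inl rfl⟩
    · symm
      apply List.filter_eq_nil_iff.mpr
      intro i _ hi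
      rcases (nearB_iff nums key k 0 i).mp hi with ⟨jn, hj, hlt, _, _⟩
      omega
    · intro i _ _ hi
      rcases (nearB_iff nums key k 0 i).mp hi with ⟨jn, hj, hlt, _, _⟩
      omega
    · intro i h0 _ _ hlt
      omega
  | succ t ih =>
    have htn : t < nums.length := by omega
    have htn' : (t : Int) < (nums.length : Int) := by exact_mod_cast htn
    obtain ⟨ih1, ih2, ih3, ih4⟩ := ih (by omega)
    have hget : PySem.List.pyGetD nums (t : Int) 0 = nums[t] := by
      rw [PySem.List.pyGetD_natCast]
      exact List.getD_eq_getElem nums 0 htn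
    rw [loopA_succ]
    set n : Int := (nums.length : Int) with hn
    set res := (loopA nums key k t).1 with hres
    set ni := (loopA nums key k t).2 with hni
    by_cases hc : nums[t] = key
    · -- key found at index t
      have hstep : stepA nums key k n (loopA nums key k t) (t : Int) =
          (res ++ PySem.List.pyRange (max ni ((t : Int) - k)) (min (n - 1) ((t : Int) + k) + 1) 1,
           min (n - 1) ((t : Int) + k) + 1) := by
        unfold stepA
        rw [hget, if_pos hc]
      rw [hstep]
      set left := max ni ((t : Int) - k) with hleft
      set right := min (n - 1) ((t : Int) + k) + 1 with hright
      have hni0 : 0 ≤ ni := by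
        rcases ih4 with h | ⟨jp, hjp, _, _, h⟩
        · omega
        · have : (0 : Int) ≤ (jp : Int) := by positivity
          omega
      have h0t : (0 : Int) ≤ (t : Int) := by positivity
      have hni_le : ni ≤ right := by
        rcases ih4 with h | ⟨jp, hjp, hjt, _, h⟩
        · omega
        · have : (0 : Int) ≤ (jp : Int) := by positivity
          omega
      have hl : 0 ≤ left := le_trans hni0 (le_max_left _ _)
      have hlr : left ≤ right := by
        rw [hleft]
        apply max_le hni_le
        omega
      have hr : right ≤ n := by omega
      have hcast : ((t + 1 : Nat) : Int) = (t : Int) + 1 := by push_cast; ring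
      have hdec : decide (nums[t] = key) = true := decide_eq_true hc
      -- the pointwise description of nearB (t+1)
      have hq : ∀ i, 0 ≤ i → i < n →
          nearB nums key k ((t : Int) + 1) i =
            (nearB nums key k (t : Int) i || (decide (left ≤ i) && decide (i < right))) := by
        intro i h0 hin
        rw [nearB_succ nums key k i t htn, hdec, Bool.true_and]
        cases hnb : nearB nums key k (t : Int) i
        · simp only [Bool.false_or]
          rw [Bool.eq_iff_iff, decide_eq_true_iff, Bool.and_eq_true,
            decide_eq_true_iff, decide_eq_true_iff, abs_le]
          constructor
          · rintro ⟨hd1, hd2⟩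
            have hile : ni ≤ i := by
              by_contra hlt
              push_neg at hlt
              have h3 := ih3 i h0 hin (by omega) hlt
              rw [h3] at hnb
              exact absurd hnb (by simp)
            exact ⟨max_le hile (by omega), by omega⟩
          · rintro ⟨hli, hir⟩
            have h1 : (t : Int) - k ≤ i := le_trans (le_max_right _ _) hli
            omega
        · simp
      refine ⟨?_, ?_, ?_, ?_⟩
      · -- result list
        rw [hcast, ih1]
        symm
        apply filter_split n left right _ _ hl hlr hr hq
        intro i h0 hin hpi
        exact lt_of_lt_of_le (ih2 i h0 hin hpi) (le_max_left _ _)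
      · intro i h0 hin hnear
        rw [hcast, hq i h0 hin] at hnear
        rcases Bool.or_eq_true_iff.mp hnear with h | h
        · exact lt_of_lt_of_le (ih2 i h0 hin h) hni_le
        · rw [Bool.and_eq_true, decide_eq_true_iff, decide_eq_true_iff] at h
          exact h.2
      · intro i h0 hin hbound hlt
        rw [hcast] at hbound ⊢
        rw [hq i h0 hin]
        cases hnb : nearB nums key k (t : Int) i
        · have hile : ni ≤ i := by
            by_contra hlt2
            push_neg at hlt2
            have h3 := ih3 i h0 hin (by omega) hlt2
            rw [h3] at hnb
            exact absurd hnb (by simp)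
          simp only [Bool.false_or, Bool.and_eq_true, decide_eq_true_iff]
          exact ⟨max_le hile (by omega), hlt⟩
        · simp
      · right
        exact ⟨t, htn, by push_cast; omega, hc, rfl⟩
    · -- no key at index t: state unchanged
      have hstep : stepA nums key k n (loopA nums key k t) (t : Int) = (res, ni) := by
        unfold stepA
        rw [hget, if_neg hc]
      rw [hstep]
      have heq : ∀ i : Int, nearB nums key k ((t : Int) + 1) i = nearB nums key k (t : Int) i := by
        intro i
        rw [nearB_succ nums key k i t htn, decide_eq_false hc]
        simp
      have hcast : ((t + 1 : Nat) : Int) = (t : Int) + 1 := by push_cast; ring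
      refine ⟨?_, ?_, ?_, ?_⟩
      · rw [hcast]
        simp only [heq]
        exact ih1
      · intro i h0 hin hnear
        rw [hcast, heq] at hnear
        exact ih2 i h0 hin hnear
      · intro i h0 hin hbound hlt
        rw [hcast] at hbound ⊢
        rw [heq]
        exact ih3 i h0 hin (by omega) hlt
      · rcases ih4 with h | ⟨jp, hjp, hjt, hkey, h⟩
        · exact Or.inl h
        · exact Or.inr ⟨jp, hjp, by push_cast at hjt ⊢; omega, hkey, h⟩

lemma loopA_neg (nums : List Int) (key k : Int) (hk : k < 0) (t : Nat) :
    (loopA nums key k t).1 = [] := by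
  induction t with
  | zero => simp [loopA, PySem.List.pyRange_one_eq_nil]
  | succ t ih =>
    rw [loopA_succ]
    unfold stepA
    split
    · have hempty : PySem.List.pyRange (max (loopA nums key k t).2 ((t : Int) - k))
          (min ((nums.length : Int) - 1) ((t : Int) + k) + 1) 1 = [] := by
        apply PySem.List.pyRange_one_eq_nil
        have h1 : min ((nums.length : Int) - 1) ((t : Int) + k) + 1 ≤ (t : Int) + k + 1 := by omega
        have h2 : (t : Int) - k ≤ max (loopA nums key k t).2 ((t : Int) - k) := le_max_right _ _
        omega
      simp [hempty, ih]
    · exact ih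

-- ===== VERDICT (by name: the statement is the Claim_ definition above) =====
theorem findKDistantIndices_spec : Claim_equal_findKDistantIndices := by
  intro nums key k _
  unfold Spec_findKDistantIndices
  have hA : findKDistantIndices nums key k = (loopA nums key k nums.length).1 := rfl
  rw [hA]
  by_cases hk : 0 ≤ k
  · rw [(invA nums key k hk nums.length le_rfl).1]
    unfold findKDistantIndices_alt
    apply List.filter_congr
    intro i _
    rw [Bool.eq_iff_iff, nearB_iff, altPred_iff]
    constructor
    · rintro ⟨jn, hj, _, hkey, hd⟩
      exact ⟨jn, hj, hkey, hd⟩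
    · rintro ⟨jn, hj, hkey, hd⟩
      exact ⟨jn, hj, by exact_mod_cast hj, hkey, hd⟩
  · push_neg at hk
    rw [loopA_neg nums key k hk]
    unfold findKDistantIndices_alt
    symm
    apply List.filter_eq_nil_iff.mpr
    intro i _ hpred
    rcases (altPred_iff nums key k i).mp hpred with ⟨jn, hj, _, hd⟩
    have : (0 : Int) ≤ |i - (jn : Int)| := abs_nonneg _
    omega
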